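-- pv_equiv track=rewrite | github.com/roctbb/ai-game-engine | games/blinking_gem_duel/engine.py | _placements
-- ===== SOURCE A (Python) =====
-- _SLOTS = ("sun", "moon")
--
-- def _placements(team_ids: dict[str, str], slot_scores: dict[str, int]) -> dict[str, int]:
--     ordered = sorted(_SLOTS, key=lambda slot: slot_scores[slot], reverse=True)
--     result: dict[str, int] = {}
--     last_score: int | None = None
--     last_place = 0
--     for index, slot in enumerate(ordered, start=1):
--         score = slot_scores[slot]
--         if score != last_score:
--             last_place = index
--             last_score = score
--         result[team_ids[slot]] = last_place
--     return result
-- ===== SOURCE B (Python) =====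
-- _SLOTS = ("sun", "moon")
--
-- def _placements(team_ids: dict[str, str], slot_scores: dict[str, int]) -> dict[str, int]:
--     s_sun = slot_scores["sun"]
--     s_moon = slot_scores["moon"]
--     if s_sun > s_moon:
--         return {team_ids["sun"]: 1, team_ids["moon"]: 2}
--     if s_moon > s_sun:
--         return {team_ids["moon"]: 1, team_ids["sun"]: 2}
--     return {team_ids["sun"]: 1, team_ids["moon"]: 1}
-- ===== Notes on version B (the rewrite author's own statement) =====
-- stated objective: simpler
-- what changed: Replaces the sort + enumerate placement loop with a direct three-way comparison of the two scores, returning the two-entry result dict as a literal in each branch.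
import Mathlib
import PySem

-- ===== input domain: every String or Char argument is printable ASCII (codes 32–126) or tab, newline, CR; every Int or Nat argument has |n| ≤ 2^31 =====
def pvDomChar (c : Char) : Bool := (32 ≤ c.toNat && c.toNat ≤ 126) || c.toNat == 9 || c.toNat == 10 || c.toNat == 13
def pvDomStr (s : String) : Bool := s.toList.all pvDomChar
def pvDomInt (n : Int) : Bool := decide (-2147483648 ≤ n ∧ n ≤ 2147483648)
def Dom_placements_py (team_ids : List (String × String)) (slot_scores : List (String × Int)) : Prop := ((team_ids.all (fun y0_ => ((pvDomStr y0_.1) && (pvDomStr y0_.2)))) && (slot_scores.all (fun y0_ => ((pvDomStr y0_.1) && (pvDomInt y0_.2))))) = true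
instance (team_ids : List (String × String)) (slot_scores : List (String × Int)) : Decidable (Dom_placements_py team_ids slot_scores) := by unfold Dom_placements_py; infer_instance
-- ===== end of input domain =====

-- B replaces A's sort + enumerate placement loop with a direct three-way score comparison (objective: simpler).

-- ===== PORT A =====
-- dict lookup d[k] on an association list: first match; total form (.getD) used only under Pre_
def placements_py (team_ids : List (String × String)) (slot_scores : List (String × Int)) : List (String × Int) :=
  let ordered := PySem.List.sorted ["sun", "moon"] (fun slot => (slot_scores.lookup slot).getD 0) true
  -- state: (result, last_score, last_place, index); index starts at 1 (enumerate(..., start=1))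
  let final := ordered.foldl
    (fun (st : PySem.Dict String Int × Option Int × Int × Int) slot =>
      let score := (slot_scores.lookup slot).getD 0
      let lp := if some score ≠ st.2.1 then st.2.2.2 else st.2.2.1
      let ls := if some score ≠ st.2.1 then some score else st.2.1
      (st.1.insert ((team_ids.lookup slot).getD "") lp, ls, lp, st.2.2.2 + 1))
    (PySem.Dict.empty, none, 0, 1)
  final.1.items

-- ===== PORT B =====
def placements_py_alt (team_ids : List (String × String)) (slot_scores : List (String × Int)) : List (String × Int) :=
  let s_sun := (slot_scores.lookup "sun").getD 0
  let s_moon := (slot_scores.lookup "moon").getD 0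
  if s_sun > s_moon then
    ((PySem.Dict.empty.insert ((team_ids.lookup "sun").getD "") 1).insert ((team_ids.lookup "moon").getD "") 2).items
  else if s_moon > s_sun then
    ((PySem.Dict.empty.insert ((team_ids.lookup "moon").getD "") 1).insert ((team_ids.lookup "sun").getD "") 2).items
  else
    ((PySem.Dict.empty.insert ((team_ids.lookup "sun").getD "") 1).insert ((team_ids.lookup "moon").getD "") 1).items

-- ===== PRECONDITION & SPEC =====
-- Pre_ excludes the inputs where Python A raises KeyError: both dicts must contain the keys "sun" and "moon".
def Pre_placements_py (team_ids : List (String × String)) (slot_scores : List (String × Int)) : Prop :=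
  (team_ids.lookup "sun").isSome ∧ (team_ids.lookup "moon").isSome ∧
  (slot_scores.lookup "sun").isSome ∧ (slot_scores.lookup "moon").isSome
instance (team_ids : List (String × String)) (slot_scores : List (String × Int)) : Decidable (Pre_placements_py team_ids slot_scores) := by unfold Pre_placements_py; infer_instance
def pvWitness_placements_py : (List (String × String)) × (List (String × Int)) :=
  ([("sun", "A"), ("moon", "B")], [("sun", 3), ("moon", 1)])

def Spec_placements_py (team_ids : List (String × String)) (slot_scores : List (String × Int)) (out : List (String × Int)) : Prop := out = placements_py_alt team_ids slot_scores
instance (team_ids : List (String × String)) (slot_scores : List (String × Int)) (out : List (String × Int)) : Decidable (Spec_placements_py team_ids slot_scores out) := by unfold Spec_placements_py; infer_instance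

-- ===== CLAIM (what is proved, stated in full; the proofs are below) =====
def Claim_equal_placements_py : Prop := ∀ (team_ids : List (String × String)) (slot_scores : List (String × Int)), Dom_placements_py team_ids slot_scores → Pre_placements_py team_ids slot_scores → Spec_placements_py team_ids slot_scores (placements_py team_ids slot_scores)

-- ===== LEMMAS AND PROOFS =====

-- ===== VERDICT (by name: the statement is the Claim_ definition above) =====
theorem placements_py_spec : Claim_equal_placements_py := by
  intro team_ids slot_scores _ hpre
  obtain ⟨h1, h2, h3, h4⟩ := hpre
  obtain ⟨tsun, htsun⟩ := Option.isSome_iff_exists.mp h1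
  obtain ⟨tmoon, htmoon⟩ := Option.isSome_iff_exists.mp h2
  obtain ⟨ssun, hssun⟩ := Option.isSome_iff_exists.mp h3
  obtain ⟨smoon, hsmoon⟩ := Option.isSome_iff_exists.mp h4
  unfold Spec_placements_py placements_py placements_py_alt
  simp only [htsun, htmoon, hssun, hsmoon, Option.getD_some]
  by_cases hgt : ssun > smoon
  · simp [PySem.List.sorted, PySem.List.insertBy, htsun, htmoon, hssun, hsmoon, hgt,
      not_lt.mpr (le_of_lt hgt), List.foldl, ne_of_lt hgt]
  · by_cases hlt : smoon > ssun
    · simp [PySem.List.sorted, PySem.List.insertBy, htsun, htmoon, hssun, hsmoon, hlt, hgt,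
        List.foldl, ne_of_lt hlt]
    · have heq : ssun = smoon := by omega
      simp [PySem.List.sorted, PySem.List.insertBy, htsun, htmoon, hssun, hsmoon, heq,
        List.foldl]
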